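-- pv_equiv track=rewrite | github.com/commaai/openpilot | selfdrive/ui/update_translations.py | _po_unescape
-- ===== SOURCE A (Python) =====
-- def _po_unescape(s: str) -> str:
--   result = []
--   i = 0
--   while i < len(s):
--     if s[i] == '\\' and i + 1 < len(s):
--       c = s[i + 1]
--       if c == 'n':
--         result.append('\n')
--       elif c == 't':
--         result.append('\t')
--       elif c == '\\':
--         result.append('\\')
--       elif c == '"':
--         result.append('"')
--       else:
--         result.append(s[i:i + 2])
--       i += 2
--     else:
--       result.append(s[i])
--       i += 1
--   return ''.join(result)
-- ===== SOURCE B (Python) =====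
-- def _po_unescape(s: str) -> str:
--   out = []
--   pending = False  # True when the previous character was an unconsumed backslash
--   for ch in s:
--     if pending:
--       if ch == 'n':
--         out.append('\n')
--       elif ch == 't':
--         out.append('\t')
--       elif ch == '\\':
--         out.append('\\')
--       elif ch == '"':
--         out.append('"')
--       else:
--         out.append('\\')
--         out.append(ch)
--       pending = False
--     elif ch == '\\':
--       pending = True
--     else:
--       out.append(ch)
--   if pending:
--     out.append('\\')
--   return ''.join(out)
-- ===== Notes on version B (the rewrite author's own statement) =====
-- stated objective: alternative
-- what changed: Replaced the index-based lookahead loop (peeking at s[i+1] and slicing s[i:i+2]) by a single state-machine fold over the characters that carries a pending-backslash flag and never indexes or slices.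
import Mathlib
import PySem

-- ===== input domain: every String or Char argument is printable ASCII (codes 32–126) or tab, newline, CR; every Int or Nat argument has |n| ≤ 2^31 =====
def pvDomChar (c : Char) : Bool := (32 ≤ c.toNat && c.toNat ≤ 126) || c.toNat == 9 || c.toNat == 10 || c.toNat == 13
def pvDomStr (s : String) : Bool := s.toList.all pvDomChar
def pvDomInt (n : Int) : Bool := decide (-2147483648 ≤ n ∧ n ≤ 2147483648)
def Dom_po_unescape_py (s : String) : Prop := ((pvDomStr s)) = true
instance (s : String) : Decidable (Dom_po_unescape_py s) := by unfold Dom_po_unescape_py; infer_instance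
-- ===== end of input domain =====

-- B replaces A's index-and-lookahead loop by a one-pass state-machine fold with a
-- pending-backslash flag (no indexing, no slicing); same cost, different decomposition.

-- ===== PORT A =====
-- A's while loop over index i, appending string pieces to 'result'; joined at the end.
def poAGo (cs : List Char) (i : Nat) (res : List (List Char)) : List (List Char) :=
  if h : i < cs.length then
    if h2 : cs[i] = '\\' ∧ i + 1 < cs.length then
      let c := cs[i + 1]'h2.2
      let piece :=
        if c = 'n' then ['\n']
        else if c = 't' then ['\t']
        else if c = '\\' then ['\\']
        else if c = '"' then ['"']
        else PySem.List.slice cs (some (i : Int)) (some ((i : Int) + 2))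
      poAGo cs (i + 2) (res ++ [piece])
    else
      poAGo cs (i + 1) (res ++ [[cs[i]]])
  else res
termination_by cs.length - i

def po_unescape_py (s : String) : String :=
  String.ofList (poAGo s.toList 0 []).flatten

-- ===== PORT B =====
-- B's fold step: state = (output so far, pending backslash flag).
def poBStep (st : List Char × Bool) (ch : Char) : List Char × Bool :=
  if st.2 then
    (st.1 ++
      (if ch = 'n' then ['\n']
       else if ch = 't' then ['\t']
       else if ch = '\\' then ['\\']
       else if ch = '"' then ['"']
       else ['\\', ch]), false)
  else if ch = '\\' then (st.1, true)
  else (st.1 ++ [ch], false)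

def po_unescape_py_alt (s : String) : String :=
  let r := s.toList.foldl poBStep ([], false)
  String.ofList (if r.2 then r.1 ++ ['\\'] else r.1)

-- ===== PRECONDITION & SPEC =====
def Spec_po_unescape_py (s : String) (out : String) : Prop := out = po_unescape_py_alt s
instance (s : String) (out : String) : Decidable (Spec_po_unescape_py s out) := by unfold Spec_po_unescape_py; infer_instance

-- ===== CLAIM (what is proved, stated in full; the proofs are below) =====
def Claim_equal_po_unescape_py : Prop := ∀ (s : String), Dom_po_unescape_py s → Spec_po_unescape_py s (po_unescape_py s)

-- ===== LEMMAS AND PROOFS =====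

-- the decoded form of an escaped character
def pvEsc (c : Char) : List Char :=
  if c = 'n' then ['\n']
  else if c = 't' then ['\t']
  else if c = '\\' then ['\\']
  else if c = '"' then ['"']
  else ['\\', c]

-- common specification: recursive unescape on the character list
def pvSpecFn : List Char → List Char
  | [] => []
  | [a] => [a]
  | a :: c :: rest => if a = '\\' then pvEsc c ++ pvSpecFn rest else a :: pvSpecFn (c :: rest)

theorem pvSpecFn_cons_not_esc (a : Char) (t : List Char)
    (h : ¬ (a = '\\' ∧ t ≠ [])) : pvSpecFn (a :: t) = a :: pvSpecFn t := by
  cases t with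
  | nil => simp [pvSpecFn]
  | cons c rest =>
    have ha : ¬ a = '\\' := by
      intro hh; exact h ⟨hh, by simp⟩
    simp [pvSpecFn, ha]

theorem pvSpecFn_esc (c : Char) (rest : List Char) :
    pvSpecFn ('\\' :: c :: rest) = pvEsc c ++ pvSpecFn rest := by
  simp [pvSpecFn]

-- A's loop computes pvSpecFn on the remaining suffix
theorem poAGo_eq (cs : List Char) :
    ∀ n i res, cs.length - i = n →
      (poAGo cs i res).flatten = res.flatten ++ pvSpecFn (cs.drop i) := by
  intro n
  induction n using Nat.strong_induction_on with
  | _ n ih =>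
    intro i res hn
    rw [poAGo]
    by_cases h : i < cs.length
    · have hdrop : cs.drop i = cs[i] :: cs.drop (i + 1) := List.drop_eq_getElem_cons h
      by_cases h2 : cs[i] = '\\' ∧ i + 1 < cs.length
      · have hdrop2 : cs.drop (i + 1) = cs[i+1] :: cs.drop (i + 2) :=
          List.drop_eq_getElem_cons h2.2
        rw [dif_pos h, dif_pos h2]
        rw [ih (cs.length - (i + 2)) (by omega) (i + 2) _ rfl]
        rw [hdrop, hdrop2, h2.1, pvSpecFn_esc]
        have hslice : PySem.List.slice cs (some (i : Int)) (some ((i : Int) + 2)) =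
            (cs.drop i).take 2 := by
          have := PySem.List.slice_natCast_add (xs := cs) (j := i) (n := 2)
          simpa using this
        have htake : (cs.drop i).take 2 = ['\\', cs[i+1]] := by
          rw [hdrop, h2.1, hdrop2]
          rfl
        unfold pvEsc
        simp only [hslice, htake]
        split_ifs <;> simp
      · rw [dif_pos h, dif_neg h2]
        rw [ih (cs.length - (i + 1)) (by omega) (i + 1) _ rfl]
        rw [hdrop]
        rw [pvSpecFn_cons_not_esc]
        · simp
        · intro ⟨hb, hne⟩
          apply h2
          refine ⟨hb, ?_⟩
          have : cs.drop (i + 1) ≠ [] := hne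
          simp only [ne_eq, List.drop_eq_nil_iff, not_le] at this
          omega
    · have : cs.drop i = [] := by
        simp only [List.drop_eq_nil_iff]; omega
      simp [h, this, pvSpecFn]

-- B's fold computes pvSpecFn; pvSpecFnP is its value with a pending backslash
def pvSpecFnP : List Char → List Char
  | [] => ['\\']
  | c :: rest => pvEsc c ++ pvSpecFn rest

theorem pvSpecFn_bs (rest : List Char) : pvSpecFn ('\\' :: rest) = pvSpecFnP rest := by
  cases rest with
  | nil => simp [pvSpecFn, pvSpecFnP]
  | cons c r => simp [pvSpecFn, pvSpecFnP]

theorem poBFold_eq : ∀ (t : List Char) (out : List Char) (pending : Bool),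
    (let r := t.foldl poBStep (out, pending)
     if r.2 then r.1 ++ ['\\'] else r.1) =
      out ++ (if pending then pvSpecFnP t else pvSpecFn t) := by
  intro t
  induction t with
  | nil =>
    intro out pending
    cases pending <;> simp [pvSpecFn, pvSpecFnP]
  | cons ch rest ih =>
    intro out pending
    cases pending with
    | true =>
      have step : poBStep (out, true) ch = (out ++ pvEsc ch, false) := by
        simp [poBStep, pvEsc]
      simp only [List.foldl_cons, step]
      rw [ih (out ++ pvEsc ch) false]
      simp [pvSpecFnP]
    | false =>
      by_cases hch : ch = '\\'
      · subst hch
        have step : poBStep (out, false) '\\' = (out, true) := by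
          simp [poBStep]
        simp only [List.foldl_cons, step]
        rw [ih out true]
        simp [pvSpecFn_bs]
      · have step : poBStep (out, false) ch = (out ++ [ch], false) := by
          simp [poBStep, hch]
        simp only [List.foldl_cons, step]
        rw [ih (out ++ [ch]) false]
        rw [pvSpecFn_cons_not_esc ch rest (by intro hh; exact hch hh.1)]
        simp

-- ===== VERDICT (by name: the statement is the Claim_ definition above) =====
theorem po_unescape_py_spec : Claim_equal_po_unescape_py := by
  intro s _
  unfold Spec_po_unescape_py po_unescape_py po_unescape_py_alt
  rw [poAGo_eq s.toList (s.toList.length - 0) 0 [] rfl]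
  have h := poBFold_eq s.toList [] false
  simp only [if_neg Bool.false_ne_true, List.nil_append] at h ⊢
  simp only [List.flatten_nil, List.nil_append, List.drop_zero]
  rw [h]
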